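-- pv_equiv track=rewrite | github.com/Zongiin/DungeonEscape | dungeonescape.py | RGStage2
-- ===== SOURCE A (Python) =====
-- def RGStage2(bs,rd):
-- 	for v in range(len(rd)):
-- 		for i in range(rd[v][5]):
-- 			for j in range(rd[v][4]):
-- 				bs[rd[v][0]+j][rd[v][1]+i] = 'r'
-- 				if(i==0 or i==rd[v][5]-1 or j==0 or j==rd[v][4]-1):
-- 					bs[rd[v][0]+j][rd[v][1]+i] = 'w'
-- 	return bs
-- ===== SOURCE B (Python) =====
-- def RGStage2(bs, rd):
--     rects = list(reversed(rd))
--     for r in range(len(bs)):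
--         row = bs[r]
--         for c in range(len(row)):
--             for rect in rects:
--                 r0, c0, h, w = rect[0], rect[1], rect[4], rect[5]
--                 if r0 <= r < r0 + h and c0 <= c < c0 + w:
--                     row[c] = 'w' if (r == r0 or r == r0 + h - 1 or c == c0 or c == c0 + w - 1) else 'r'
--                     break
--     return bs
-- ===== Notes on version B (the rewrite author's own statement) =====
-- stated objective: alternative
-- what changed: B replaces A's per-rectangle in-place painting (triple nested loop writing 'r' then conditionally 'w' per cell) by a per-cell recomputation: for every grid cell it scans the rectangles last-to-first and the last rectangle covering the cell decides 'w' (border) or 'r' (interior), so no cell is written twice; Pre_ excludes, besides the inputs where A raises IndexError, rectangles with positive extents but a negative row/column origin, on which A paints cells at Python's wrapped-around indices from the grid's far edge while B clips the rectangle at the grid edge.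
import Mathlib
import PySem

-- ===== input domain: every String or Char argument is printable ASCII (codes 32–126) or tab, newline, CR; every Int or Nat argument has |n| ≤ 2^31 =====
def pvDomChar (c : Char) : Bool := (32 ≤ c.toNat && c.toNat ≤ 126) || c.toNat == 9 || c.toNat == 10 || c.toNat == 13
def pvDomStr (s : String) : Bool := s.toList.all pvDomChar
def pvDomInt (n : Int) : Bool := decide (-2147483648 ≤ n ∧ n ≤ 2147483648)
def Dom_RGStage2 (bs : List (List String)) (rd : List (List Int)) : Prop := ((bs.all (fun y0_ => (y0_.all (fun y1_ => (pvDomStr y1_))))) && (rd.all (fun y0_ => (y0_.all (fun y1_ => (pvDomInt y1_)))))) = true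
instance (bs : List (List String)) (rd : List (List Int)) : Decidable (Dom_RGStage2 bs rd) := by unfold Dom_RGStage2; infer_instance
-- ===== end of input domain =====

-- B is an alternative (not faster) re-implementation: per-cell recomputation — last covering
-- rectangle wins — instead of A's per-rectangle in-place painting; equal return value on Pre_
-- (both mutate bs in Python; the mutation coincides with the return value there).

-- ===== PORT A =====
-- Python's `bs[r][c] = x` (wraparound for negative indices; the out-of-range IndexError
-- cases are excluded by Pre_, where pySetD/pyGetD are no-ops instead).
def pvWrite (g : List (List String)) (r c : Int) (x : String) : List (List String) :=
  PySem.List.pySetD g r (PySem.List.pySetD (PySem.List.pyGetD g r []) c x)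

def RGStage2 (bs : List (List String)) (rd : List (List Int)) : List (List String) :=
  (List.range rd.length).foldl (fun g v =>
    -- rd[v] is always in range (v < len rd); rd[v][k] on a short row raises in Python
    -- (excluded by Pre_), `getD … 0` there.
    let rect := rd.getD v []
    (PySem.List.pyRange 0 (rect.getD 5 0) 1).foldl (fun g i =>
      (PySem.List.pyRange 0 (rect.getD 4 0) 1).foldl (fun g j =>
        let g := pvWrite g (rect.getD 0 0 + j) (rect.getD 1 0 + i) "r"
        if i = 0 ∨ i = rect.getD 5 0 - 1 ∨ j = 0 ∨ j = rect.getD 4 0 - 1 then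
          pvWrite g (rect.getD 0 0 + j) (rect.getD 1 0 + i) "w"
        else g) g) g) bs

-- ===== PORT B =====
-- scan of `rects = list(reversed(rd))` with break: first covering rectangle decides the cell.
def coverVal : List (List Int) → Int → Int → String → String
  | [], _, _, old => old
  | rect :: rest, r, c, old =>
    let r0 := rect.getD 0 0
    let c0 := rect.getD 1 0
    let h := rect.getD 4 0
    let w := rect.getD 5 0
    if r0 ≤ r ∧ r < r0 + h ∧ c0 ≤ c ∧ c < c0 + w then
      (if r = r0 ∨ r = r0 + h - 1 ∨ c = c0 ∨ c = c0 + w - 1 then "w" else "r")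
    else coverVal rest r c old

def RGStage2_alt (bs : List (List String)) (rd : List (List Int)) : List (List String) :=
  bs.mapIdx (fun r row => row.mapIdx (fun c ch => coverVal rd.reverse (r : Int) (c : Int) ch))

-- ===== PRECONDITION & SPEC =====
-- Pre_ excludes the inputs where A raises (a rectangle row shorter than 6 → IndexError on
-- rd[v][5]; a painted row or column index out of range → IndexError), and it also excludes
-- rectangles with positive extents but a negative row/column origin, on which A still returns:
-- there Python's negative indexing makes A paint cells counted from the far edge of the grid,
-- a corner no caller of a grid-painting routine would specify, while B clips the rectangle at
-- the grid edge (see claim.json "cites" for an excluded example).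
def Pre_RGStage2 (bs : List (List String)) (rd : List (List Int)) : Prop :=
  ∀ rect ∈ rd, 6 ≤ rect.length ∧
    (0 < rect.getD 4 0 → 0 < rect.getD 5 0 →
      0 ≤ rect.getD 0 0 ∧ 0 ≤ rect.getD 1 0 ∧
      rect.getD 0 0 + rect.getD 4 0 ≤ (bs.length : Int) ∧
      ∀ j ∈ List.range (rect.getD 4 0).toNat,
        rect.getD 1 0 + rect.getD 5 0 ≤ ((bs.getD ((rect.getD 0 0).toNat + j) []).length : Int))
instance (bs : List (List String)) (rd : List (List Int)) : Decidable (Pre_RGStage2 bs rd) := by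
  unfold Pre_RGStage2; infer_instance

def pvWitness_RGStage2 : List (List String) × List (List Int) :=
  ([["."], ["."]], [[0, 0, 0, 0, 2, 1]])

def Spec_RGStage2 (bs : List (List String)) (rd : List (List Int)) (out : List (List String)) : Prop :=
  out = RGStage2_alt bs rd
instance (bs : List (List String)) (rd : List (List Int)) (out : List (List String)) : Decidable (Spec_RGStage2 bs rd out) := by
  unfold Spec_RGStage2; infer_instance

-- ===== CLAIM (what is proved, stated in full; the proofs are below) =====
def Claim_equal_RGStage2 : Prop := ∀ (bs : List (List String)) (rd : List (List Int)), Dom_RGStage2 bs rd → Pre_RGStage2 bs rd → Spec_RGStage2 bs rd (RGStage2 bs rd)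

-- ===== LEMMAS AND PROOFS =====

-- cell access used throughout the proofs
def pvCell (g : List (List String)) (r c : Nat) : String := (g.getD r []).getD c ""

-- what Pre_ ∧ ¬D_ give for one rectangle, in ℕ-friendly form
def pvGood (bs : List (List String)) (rect : List Int) : Prop :=
  0 < rect.getD 4 0 → 0 < rect.getD 5 0 →
    0 ≤ rect.getD 0 0 ∧ rect.getD 0 0 + rect.getD 4 0 ≤ (bs.length : Int) ∧
    0 ≤ rect.getD 1 0 ∧
    ∀ j : Nat, (j : Int) < rect.getD 4 0 →
      rect.getD 1 0 + rect.getD 5 0 ≤ ((bs.getD ((rect.getD 0 0).toNat + j) []).length : Int)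

-- A's per-rectangle step, after replacing the index loop over rd by a fold over rd itself
def pvStep (g : List (List String)) (rect : List Int) : List (List String) :=
  (PySem.List.pyRange 0 (rect.getD 5 0) 1).foldl (fun g i =>
    (PySem.List.pyRange 0 (rect.getD 4 0) 1).foldl (fun g j =>
      let g := pvWrite g (rect.getD 0 0 + j) (rect.getD 1 0 + i) "r"
      if i = 0 ∨ i = rect.getD 5 0 - 1 ∨ j = 0 ∨ j = rect.getD 4 0 - 1 then
        pvWrite g (rect.getD 0 0 + j) (rect.getD 1 0 + i) "w"
      else g) g) g

-- shape: same row lengths as bs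
def pvShape (bs g : List (List String)) : Prop :=
  g.length = bs.length ∧ ∀ r : Nat, (g.getD r []).length = (bs.getD r []).length

theorem pvFoldlRangeGetD {α β : Type} (f : β → α → β) (d : α) :
    ∀ (l : List α) (b : β),
      (List.range l.length).foldl (fun g v => f g (l.getD v d)) b = l.foldl f b := by
  intro l
  induction l with
  | nil => intro b; rfl
  | cons x xs ih =>
    intro b
    rw [List.length_cons, List.range_succ_eq_map, List.foldl_cons, List.foldl_map]
    simpa using ih (f b x)

theorem RGStage2_eq_foldl (bs : List (List String)) (rd : List (List Int)) :
    RGStage2 bs rd = rd.foldl pvStep bs := by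
  show (List.range rd.length).foldl (fun g v => pvStep g (rd.getD v [])) bs = rd.foldl pvStep bs
  exact pvFoldlRangeGetD pvStep [] rd bs

theorem pvGetDSet {α : Type} (l : List α) (i : Nat) (x d : α) (j : Nat) :
    (l.set i x).getD j d = if i = j ∧ i < l.length then x else l.getD j d := by
  simp only [List.getD_eq_getElem?_getD, List.getElem?_set]
  split_ifs with h1 h2 h3 h3 <;> simp_all <;> omega

theorem pvWrite_eq (g : List (List String)) (ri ci : Int) (x : String)
    (hr0 : 0 ≤ ri) (hc0 : 0 ≤ ci) :
    pvWrite g ri ci x = g.set ri.toNat ((g.getD ri.toNat []).set ci.toNat x) := by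
  obtain ⟨rn, rfl⟩ : ∃ n : Nat, ri = (n : Int) := ⟨ri.toNat, (Int.toNat_of_nonneg hr0).symm⟩
  obtain ⟨cn, rfl⟩ : ∃ n : Nat, ci = (n : Int) := ⟨ci.toNat, (Int.toNat_of_nonneg hc0).symm⟩
  simp [pvWrite]

theorem pvShape_write (bs g : List (List String)) (hs : pvShape bs g) (ri ci : Int) (x : String)
    (hr0 : 0 ≤ ri) (hc0 : 0 ≤ ci) : pvShape bs (pvWrite g ri ci x) := by
  rw [pvWrite_eq g ri ci x hr0 hc0]
  refine ⟨by simpa using hs.1, fun r => ?_⟩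
  rw [pvGetDSet]
  split_ifs with h
  · rw [List.length_set, ← h.1]; exact hs.2 _
  · exact hs.2 r

theorem pvWrite_cell (g : List (List String)) (ri ci : Int) (x : String)
    (hr0 : 0 ≤ ri) (hc0 : 0 ≤ ci) (hr : ri.toNat < g.length)
    (hc : ci.toNat < (g.getD ri.toNat []).length) (r c : Nat) :
    pvCell (pvWrite g ri ci x) r c =
      if ri.toNat = r ∧ ci.toNat = c then x else pvCell g r c := by
  rw [pvWrite_eq g ri ci x hr0 hc0]
  unfold pvCell
  rw [pvGetDSet]
  by_cases hrr : ri.toNat = r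
  · subst hrr
    rw [if_pos ⟨rfl, hr⟩, pvGetDSet]
    by_cases hcc : ci.toNat = c
    · subst hcc
      rw [if_pos ⟨rfl, hc⟩, if_pos ⟨rfl, rfl⟩]
    · rw [if_neg (by tauto), if_neg (by tauto)]
  · rw [if_neg (by tauto), if_neg (by tauto)]

theorem pvFoldlConst {α β : Type} (l : List α) (b : β) :
    l.foldl (fun b _ => b) b = b := by
  induction l generalizing b with
  | nil => rfl
  | cons x xs ih => simpa using ih b

-- one column pass (the inner j-loop of A) for a fixed column i, partial to row band m
theorem pvColPass_spec (bs : List (List String)) (rect : List Int) (i : Int)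
    (hi0 : 0 ≤ i) (hiw : i < rect.getD 5 0) (hh : 0 < rect.getD 4 0)
    (hr0 : 0 ≤ rect.getD 0 0) (hrh : rect.getD 0 0 + rect.getD 4 0 ≤ (bs.length : Int))
    (hc0 : 0 ≤ rect.getD 1 0)
    (hcol : ∀ j : Nat, (j : Int) < rect.getD 4 0 →
      rect.getD 1 0 + rect.getD 5 0 ≤ ((bs.getD ((rect.getD 0 0).toNat + j) []).length : Int)) :
    ∀ (m : Nat), (m : Int) ≤ rect.getD 4 0 → ∀ g, pvShape bs g →
      pvShape bs ((PySem.List.pyRange 0 (m : Int) 1).foldl (fun g j =>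
          let g' := pvWrite g (rect.getD 0 0 + j) (rect.getD 1 0 + i) "r"
          if i = 0 ∨ i = rect.getD 5 0 - 1 ∨ j = 0 ∨ j = rect.getD 4 0 - 1 then
            pvWrite g' (rect.getD 0 0 + j) (rect.getD 1 0 + i) "w"
          else g') g) ∧
      ∀ r c : Nat, r < bs.length → c < (bs.getD r []).length →
        pvCell ((PySem.List.pyRange 0 (m : Int) 1).foldl (fun g j =>
          let g' := pvWrite g (rect.getD 0 0 + j) (rect.getD 1 0 + i) "r"
          if i = 0 ∨ i = rect.getD 5 0 - 1 ∨ j = 0 ∨ j = rect.getD 4 0 - 1 then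
            pvWrite g' (rect.getD 0 0 + j) (rect.getD 1 0 + i) "w"
          else g') g) r c =
          if rect.getD 0 0 ≤ (r : Int) ∧ (r : Int) < rect.getD 0 0 + (m : Int) ∧
             (c : Int) = rect.getD 1 0 + i then
            (if (r : Int) = rect.getD 0 0 ∨ (r : Int) = rect.getD 0 0 + rect.getD 4 0 - 1 ∨
                (c : Int) = rect.getD 1 0 ∨ (c : Int) = rect.getD 1 0 + rect.getD 5 0 - 1
             then "w" else "r")
          else pvCell g r c := by
  intro m
  induction m with
  | zero =>
    intro _ g hs
    rw [show ((0 : Nat) : Int) = 0 by norm_num, PySem.List.pyRange_one_eq_nil (le_refl 0)]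
    refine ⟨hs, fun r c hrb hcb => ?_⟩
    rw [List.foldl_nil, if_neg (by omega)]
  | succ m ih =>
    intro hm g hs
    have hm' : (m : Int) ≤ rect.getD 4 0 := by push_cast at hm ⊢; omega
    rw [show ((m + 1 : Nat) : Int) = (m : Int) + 1 by push_cast; ring,
      PySem.List.pyRange_one_succ_right (show (0 : Int) ≤ (m : Int) by positivity),
      List.foldl_append, List.foldl_cons, List.foldl_nil]
    obtain ⟨ihs, ihc⟩ := ih hm' g hs
    set gm := (PySem.List.pyRange 0 (m : Int) 1).foldl (fun g j =>
          let g' := pvWrite g (rect.getD 0 0 + j) (rect.getD 1 0 + i) "r"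
          if i = 0 ∨ i = rect.getD 5 0 - 1 ∨ j = 0 ∨ j = rect.getD 4 0 - 1 then
            pvWrite g' (rect.getD 0 0 + j) (rect.getD 1 0 + i) "w"
          else g') g with hgm
    have hri0 : 0 ≤ rect.getD 0 0 + (m : Int) := by positivity
    have hci0 : 0 ≤ rect.getD 1 0 + i := by positivity
    have hriN : (rect.getD 0 0 + (m : Int)).toNat = (rect.getD 0 0).toNat + m := by omega
    have hriLt : (rect.getD 0 0 + (m : Int)).toNat < gm.length := by
      rw [ihs.1]; omega
    have hrow : (gm.getD (rect.getD 0 0 + (m : Int)).toNat []).length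
        = (bs.getD ((rect.getD 0 0).toNat + m) []).length := by
      rw [hriN]; exact ihs.2 _
    have hciLt : (rect.getD 1 0 + i).toNat < (gm.getD (rect.getD 0 0 + (m : Int)).toNat []).length := by
      rw [hrow]
      have := hcol m (by omega)
      omega
    have hs1 : pvShape bs (pvWrite gm (rect.getD 0 0 + (m : Int)) (rect.getD 1 0 + i) "r") :=
      pvShape_write bs gm ihs _ _ _ hri0 hci0
    have hriLt1 : (rect.getD 0 0 + (m : Int)).toNat
        < (pvWrite gm (rect.getD 0 0 + (m : Int)) (rect.getD 1 0 + i) "r").length := by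
      rw [hs1.1, ← ihs.1]; exact hriLt
    have hciLt1 : (rect.getD 1 0 + i).toNat
        < ((pvWrite gm (rect.getD 0 0 + (m : Int)) (rect.getD 1 0 + i) "r").getD
            (rect.getD 0 0 + (m : Int)).toNat []).length := by
      rw [hs1.2, hriN, ← hrow]; exact hciLt
    constructor
    · split_ifs with hb
      · exact pvShape_write bs _ hs1 _ _ _ hri0 hci0
      · exact hs1
    · intro r c hrb hcb
      have hcell : pvCell (if i = 0 ∨ i = rect.getD 5 0 - 1 ∨ ((m : Nat) : Int) = 0 ∨
            ((m : Nat) : Int) = rect.getD 4 0 - 1 then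
            pvWrite (pvWrite gm (rect.getD 0 0 + (m : Int)) (rect.getD 1 0 + i) "r")
              (rect.getD 0 0 + (m : Int)) (rect.getD 1 0 + i) "w"
          else pvWrite gm (rect.getD 0 0 + (m : Int)) (rect.getD 1 0 + i) "r") r c =
          if (rect.getD 0 0 + (m : Int)).toNat = r ∧ (rect.getD 1 0 + i).toNat = c then
            (if i = 0 ∨ i = rect.getD 5 0 - 1 ∨ ((m : Nat) : Int) = 0 ∨
                ((m : Nat) : Int) = rect.getD 4 0 - 1 then "w" else "r")
          else pvCell gm r c := by
        by_cases hb : i = 0 ∨ i = rect.getD 5 0 - 1 ∨ ((m : Nat) : Int) = 0 ∨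
            ((m : Nat) : Int) = rect.getD 4 0 - 1
        · rw [if_pos hb, if_pos hb, pvWrite_cell _ _ _ _ hri0 hci0 hriLt1 hciLt1,
            pvWrite_cell _ _ _ _ hri0 hci0 hriLt hciLt]
          by_cases hhit : (rect.getD 0 0 + (m : Int)).toNat = r ∧ (rect.getD 1 0 + i).toNat = c
          · rw [if_pos hhit, if_pos hhit]
          · rw [if_neg hhit, if_neg hhit, if_neg hhit]
        · rw [if_neg hb, if_neg hb, pvWrite_cell _ _ _ _ hri0 hci0 hriLt hciLt]
      have hrest : (if (rect.getD 0 0 + (m : Int)).toNat = r ∧ (rect.getD 1 0 + i).toNat = c then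
            (if i = 0 ∨ i = rect.getD 5 0 - 1 ∨ ((m : Nat) : Int) = 0 ∨
                ((m : Nat) : Int) = rect.getD 4 0 - 1 then "w" else "r")
          else pvCell gm r c) =
          if rect.getD 0 0 ≤ (r : Int) ∧ (r : Int) < rect.getD 0 0 + ((m : Int) + 1) ∧
             (c : Int) = rect.getD 1 0 + i then
            (if (r : Int) = rect.getD 0 0 ∨ (r : Int) = rect.getD 0 0 + rect.getD 4 0 - 1 ∨
                (c : Int) = rect.getD 1 0 ∨ (c : Int) = rect.getD 1 0 + rect.getD 5 0 - 1
             then "w" else "r")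
          else pvCell g r c := by
        rw [ihc r c hrb hcb]
        by_cases hhit : (rect.getD 0 0 + (m : Int)).toNat = r ∧ (rect.getD 1 0 + i).toNat = c
        · obtain ⟨hh1, hh2⟩ := hhit
          have hre : (r : Int) = rect.getD 0 0 + (m : Int) := by omega
          have hce : (c : Int) = rect.getD 1 0 + i := by omega
          have hnew : rect.getD 0 0 ≤ (r : Int) ∧ (r : Int) < rect.getD 0 0 + ((m : Int) + 1) ∧
              (c : Int) = rect.getD 1 0 + i := by omega
          rw [if_pos ⟨hh1, hh2⟩, if_pos hnew]
          exact if_congr (by constructor <;> intro <;> omega) rfl rfl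
        · rw [if_neg hhit]
          by_cases hceq : (c : Int) = rect.getD 1 0 + i
          · by_cases hreq : (r : Int) = rect.getD 0 0 + (m : Int)
            · exact absurd ⟨by omega, by omega⟩ hhit
            · by_cases hold : rect.getD 0 0 ≤ (r : Int) ∧ (r : Int) < rect.getD 0 0 + (m : Int) ∧
                  (c : Int) = rect.getD 1 0 + i
              · have hnew : rect.getD 0 0 ≤ (r : Int) ∧
                    (r : Int) < rect.getD 0 0 + ((m : Int) + 1) ∧
                    (c : Int) = rect.getD 1 0 + i := ⟨hold.1, by omega, hceq⟩
                rw [if_pos hold, if_pos hnew]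
              · have hnew : ¬(rect.getD 0 0 ≤ (r : Int) ∧
                    (r : Int) < rect.getD 0 0 + ((m : Int) + 1) ∧
                    (c : Int) = rect.getD 1 0 + i) := by
                  rintro ⟨a, b, -⟩
                  exact hold ⟨a, by omega, hceq⟩
                rw [if_neg hold, if_neg hnew]
          · have hold : ¬(rect.getD 0 0 ≤ (r : Int) ∧ (r : Int) < rect.getD 0 0 + (m : Int) ∧
                (c : Int) = rect.getD 1 0 + i) := fun h => hceq h.2.2
            have hnew : ¬(rect.getD 0 0 ≤ (r : Int) ∧
                (r : Int) < rect.getD 0 0 + ((m : Int) + 1) ∧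
                (c : Int) = rect.getD 1 0 + i) := fun h => hceq h.2.2
            rw [if_neg hold, if_neg hnew]
      exact hcell.trans hrest

-- the outer i-loop of A, partial to column band n
theorem pvRowPass_spec (bs : List (List String)) (rect : List Int)
    (hh : 0 < rect.getD 4 0) (hw : 0 < rect.getD 5 0)
    (hr0 : 0 ≤ rect.getD 0 0) (hrh : rect.getD 0 0 + rect.getD 4 0 ≤ (bs.length : Int))
    (hc0 : 0 ≤ rect.getD 1 0)
    (hcol : ∀ j : Nat, (j : Int) < rect.getD 4 0 →
      rect.getD 1 0 + rect.getD 5 0 ≤ ((bs.getD ((rect.getD 0 0).toNat + j) []).length : Int)) :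
    ∀ (n : Nat), (n : Int) ≤ rect.getD 5 0 → ∀ g, pvShape bs g →
      pvShape bs ((PySem.List.pyRange 0 (n : Int) 1).foldl (fun g i =>
        (PySem.List.pyRange 0 (rect.getD 4 0) 1).foldl (fun g j =>
          let g' := pvWrite g (rect.getD 0 0 + j) (rect.getD 1 0 + i) "r"
          if i = 0 ∨ i = rect.getD 5 0 - 1 ∨ j = 0 ∨ j = rect.getD 4 0 - 1 then
            pvWrite g' (rect.getD 0 0 + j) (rect.getD 1 0 + i) "w"
          else g') g) g) ∧
      ∀ r c : Nat, r < bs.length → c < (bs.getD r []).length →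
        pvCell ((PySem.List.pyRange 0 (n : Int) 1).foldl (fun g i =>
          (PySem.List.pyRange 0 (rect.getD 4 0) 1).foldl (fun g j =>
            let g' := pvWrite g (rect.getD 0 0 + j) (rect.getD 1 0 + i) "r"
            if i = 0 ∨ i = rect.getD 5 0 - 1 ∨ j = 0 ∨ j = rect.getD 4 0 - 1 then
              pvWrite g' (rect.getD 0 0 + j) (rect.getD 1 0 + i) "w"
            else g') g) g) r c =
          if rect.getD 0 0 ≤ (r : Int) ∧ (r : Int) < rect.getD 0 0 + rect.getD 4 0 ∧
             rect.getD 1 0 ≤ (c : Int) ∧ (c : Int) < rect.getD 1 0 + (n : Int) then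
            (if (r : Int) = rect.getD 0 0 ∨ (r : Int) = rect.getD 0 0 + rect.getD 4 0 - 1 ∨
                (c : Int) = rect.getD 1 0 ∨ (c : Int) = rect.getD 1 0 + rect.getD 5 0 - 1
             then "w" else "r")
          else pvCell g r c := by
  intro n
  induction n with
  | zero =>
    intro _ g hs
    rw [show ((0 : Nat) : Int) = 0 by norm_num, PySem.List.pyRange_one_eq_nil (le_refl 0)]
    refine ⟨hs, fun r c hrb hcb => ?_⟩
    rw [List.foldl_nil, if_neg (by omega)]
  | succ n ih =>
    intro hn g hs
    have hn' : (n : Int) ≤ rect.getD 5 0 := by push_cast at hn ⊢; omega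
    rw [show ((n + 1 : Nat) : Int) = (n : Int) + 1 by push_cast; ring,
      PySem.List.pyRange_one_succ_right (show (0 : Int) ≤ (n : Int) by positivity),
      List.foldl_append, List.foldl_cons, List.foldl_nil]
    obtain ⟨ihs, ihc⟩ := ih hn' g hs
    set gn := (PySem.List.pyRange 0 (n : Int) 1).foldl (fun g i =>
          (PySem.List.pyRange 0 (rect.getD 4 0) 1).foldl (fun g j =>
            let g' := pvWrite g (rect.getD 0 0 + j) (rect.getD 1 0 + i) "r"
            if i = 0 ∨ i = rect.getD 5 0 - 1 ∨ j = 0 ∨ j = rect.getD 4 0 - 1 then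
              pvWrite g' (rect.getD 0 0 + j) (rect.getD 1 0 + i) "w"
            else g') g) g with hgn
    have hcp := pvColPass_spec bs rect (n : Int) (by positivity) (by omega) hh hr0 hrh hc0 hcol
      (rect.getD 4 0).toNat (by omega) gn ihs
    rw [show (((rect.getD 4 0).toNat : Nat) : Int) = rect.getD 4 0 by omega] at hcp
    obtain ⟨hcs, hcc⟩ := hcp
    refine ⟨hcs, fun r c hrb hcb => ?_⟩
    rw [hcc r c hrb hcb, ihc r c hrb hcb]
    by_cases hhit : rect.getD 0 0 ≤ (r : Int) ∧ (r : Int) < rect.getD 0 0 + rect.getD 4 0 ∧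
        (c : Int) = rect.getD 1 0 + (n : Int)
    · obtain ⟨a, b, hce⟩ := hhit
      have hnew : rect.getD 0 0 ≤ (r : Int) ∧ (r : Int) < rect.getD 0 0 + rect.getD 4 0 ∧
          rect.getD 1 0 ≤ (c : Int) ∧ (c : Int) < rect.getD 1 0 + ((n : Int) + 1) :=
        ⟨a, b, by omega, by omega⟩
      rw [if_pos ⟨a, b, hce⟩, if_pos hnew]
    · rw [if_neg hhit]
      by_cases hold : rect.getD 0 0 ≤ (r : Int) ∧ (r : Int) < rect.getD 0 0 + rect.getD 4 0 ∧
          rect.getD 1 0 ≤ (c : Int) ∧ (c : Int) < rect.getD 1 0 + (n : Int)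
      · obtain ⟨a, b, c1, c2⟩ := hold
        have hnew : rect.getD 0 0 ≤ (r : Int) ∧ (r : Int) < rect.getD 0 0 + rect.getD 4 0 ∧
            rect.getD 1 0 ≤ (c : Int) ∧ (c : Int) < rect.getD 1 0 + ((n : Int) + 1) :=
          ⟨a, b, c1, by omega⟩
        rw [if_pos ⟨a, b, c1, c2⟩, if_pos hnew]
      · have hnew : ¬(rect.getD 0 0 ≤ (r : Int) ∧ (r : Int) < rect.getD 0 0 + rect.getD 4 0 ∧
            rect.getD 1 0 ≤ (c : Int) ∧ (c : Int) < rect.getD 1 0 + ((n : Int) + 1)) := by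
          rintro ⟨a, b, c1, c2⟩
          by_cases hce : (c : Int) = rect.getD 1 0 + (n : Int)
          · exact hhit ⟨a, b, hce⟩
          · exact hold ⟨a, b, c1, by omega⟩
        rw [if_neg hold, if_neg hnew]

theorem pvStep_spec (bs g : List (List String)) (rect : List Int)
    (hs : pvShape bs g) (hg : pvGood bs rect) :
    pvShape bs (pvStep g rect) ∧
    ∀ r c : Nat, r < bs.length → c < (bs.getD r []).length →
      pvCell (pvStep g rect) r c =
        (if rect.getD 0 0 ≤ (r : Int) ∧ (r : Int) < rect.getD 0 0 + rect.getD 4 0 ∧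
            rect.getD 1 0 ≤ (c : Int) ∧ (c : Int) < rect.getD 1 0 + rect.getD 5 0 then
          (if (r : Int) = rect.getD 0 0 ∨ (r : Int) = rect.getD 0 0 + rect.getD 4 0 - 1 ∨
              (c : Int) = rect.getD 1 0 ∨ (c : Int) = rect.getD 1 0 + rect.getD 5 0 - 1
           then "w" else "r")
        else pvCell g r c) := by
  by_cases hw : 0 < rect.getD 5 0
  · by_cases hh : 0 < rect.getD 4 0
    · obtain ⟨hr0, hrh, hc0, hcol⟩ := hg hh hw
      have := pvRowPass_spec bs rect hh hw hr0 hrh hc0 hcol (rect.getD 5 0).toNat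
        (by omega) g hs
      rw [show (((rect.getD 5 0).toNat : Nat) : Int) = rect.getD 5 0 by omega] at this
      exact this
    · -- empty inner range: nothing is written
      have hstep : pvStep g rect = g := by
        unfold pvStep
        rw [PySem.List.pyRange_one_eq_nil (show rect.getD 4 0 ≤ 0 by omega)]
        simp only [List.foldl_nil]
        exact pvFoldlConst _ g
      rw [hstep]
      exact ⟨hs, fun r c _ _ => by rw [if_neg (by omega)]⟩
  · -- empty outer range
    have hstep : pvStep g rect = g := by
      unfold pvStep
      rw [PySem.List.pyRange_one_eq_nil (show rect.getD 5 0 ≤ 0 by omega), List.foldl_nil]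
    rw [hstep]
    exact ⟨hs, fun r c _ _ => by rw [if_neg (by omega)]⟩

theorem pvFold_spec (bs : List (List String)) (rd : List (List Int))
    (hg : ∀ rect ∈ rd, pvGood bs rect) :
    pvShape bs (rd.foldl pvStep bs) ∧
    ∀ r c : Nat, r < bs.length → c < (bs.getD r []).length →
      pvCell (rd.foldl pvStep bs) r c = coverVal rd.reverse r c (pvCell bs r c) := by
  induction rd using List.reverseRecOn with
  | nil => exact ⟨⟨rfl, fun _ => rfl⟩, fun r c _ _ => rfl⟩
  | append_singleton rs rect ih =>
    obtain ⟨ihs, ihc⟩ := ih (fun x hx => hg x (List.mem_append_left _ hx))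
    have hgr : pvGood bs rect := hg rect (List.mem_append_right _ (List.mem_singleton_self _))
    rw [List.foldl_append, List.foldl_cons, List.foldl_nil]
    obtain ⟨hss, hsc⟩ := pvStep_spec bs (rs.foldl pvStep bs) rect ihs hgr
    refine ⟨hss, fun r c hrb hcb => ?_⟩
    rw [List.reverse_append, List.reverse_singleton, List.singleton_append]
    rw [hsc r c hrb hcb, ihc r c hrb hcb]
    simp only [coverVal]

-- ===== VERDICT (by name: the statement is the Claim_ definition above) =====
theorem RGStage2_spec : Claim_equal_RGStage2 := by
  intro bs rd _ hpre
  unfold Spec_RGStage2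
  have hg : ∀ rect ∈ rd, pvGood bs rect := by
    intro rect hmem hh hw
    obtain ⟨hlen, hb⟩ := hpre rect hmem
    obtain ⟨hr0, hc0, hrh, hcols⟩ := hb hh hw
    exact ⟨hr0, hrh, hc0, fun j hj => hcols j (List.mem_range.mpr (by omega))⟩
  rw [RGStage2_eq_foldl]
  obtain ⟨⟨hlen, hrows⟩, hcells⟩ := pvFold_spec bs rd hg
  unfold RGStage2_alt
  apply List.ext_getElem (by simpa using hlen)
  intro r hr1 hr2
  rw [List.getElem_mapIdx]
  have hrb : r < bs.length := by simpa using hr2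
  have hrowr : ((List.foldl pvStep bs rd).getD r []).length = (bs.getD r []).length := hrows r
  apply List.ext_getElem
  · rw [List.length_mapIdx, ← List.getD_eq_getElem (List.foldl pvStep bs rd) [] hr1, hrowr,
      List.getD_eq_getElem bs [] hrb]
  · intro c hc1 hc2
    rw [List.getElem_mapIdx]
    have hcb : c < (bs.getD r []).length := by
      rw [List.getD_eq_getElem bs [] hrb]; simpa using hc2
    have hthis := hcells r c hrb hcb
    unfold pvCell at hthis
    rw [List.getD_eq_getElem (List.foldl pvStep bs rd) [] hr1,
      List.getD_eq_getElem ((List.foldl pvStep bs rd)[r]'hr1) "" hc1,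
      List.getD_eq_getElem bs [] hrb,
      List.getD_eq_getElem (bs[r]'hrb) "" (by
        rw [← List.getD_eq_getElem bs [] hrb]; exact hcb)] at hthis
    exact hthis
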